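-- pv_equiv track=rewrite | github.com/sueszli/vector-database-benchmark | dataset/python-mutated/gen_blog_post_html.py | format_lists
-- ===== SOURCE A (Python) =====
-- def format_lists(h: str) -> str:
--     if False:
--         i = 10
--         return i + 15
--     a = h.splitlines()
--     r = []
--     i = 0
--     bullets = ('- ', '* ', ' * ')
--     while i < len(a):
--         if a[i].startswith(bullets):
--             r.append('<p><ul>')
--             while i < len(a) and a[i].startswith(bullets):
--                 r.append('<li>%s' % a[i][2:].lstrip())
--                 i += 1
--             r.append('</ul>')
--         else:
--             r.append(a[i])
--             i += 1
--     return '\n'.join(r)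
-- ===== SOURCE B (Python) =====
-- def format_lists(h: str) -> str:
--     r = []
--     in_list = False
--     for line in h.splitlines():
--         if line.startswith(('- ', '* ', ' * ')):
--             if not in_list:
--                 r.append('<p><ul>')
--                 in_list = True
--             r.append('<li>' + line[2:].lstrip())
--         else:
--             if in_list:
--                 r.append('</ul>')
--                 in_list = False
--             r.append(line)
--     if in_list:
--         r.append('</ul>')
--     return '\n'.join(r)
-- ===== Notes on version B (the rewrite author's own statement) =====
-- stated objective: simpler
-- what changed: Replaces A's index-driven outer/inner while loops (nested run detection) with a single-pass state machine over the lines that carries one in_list flag and closes the list lazily.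
import Mathlib
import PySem

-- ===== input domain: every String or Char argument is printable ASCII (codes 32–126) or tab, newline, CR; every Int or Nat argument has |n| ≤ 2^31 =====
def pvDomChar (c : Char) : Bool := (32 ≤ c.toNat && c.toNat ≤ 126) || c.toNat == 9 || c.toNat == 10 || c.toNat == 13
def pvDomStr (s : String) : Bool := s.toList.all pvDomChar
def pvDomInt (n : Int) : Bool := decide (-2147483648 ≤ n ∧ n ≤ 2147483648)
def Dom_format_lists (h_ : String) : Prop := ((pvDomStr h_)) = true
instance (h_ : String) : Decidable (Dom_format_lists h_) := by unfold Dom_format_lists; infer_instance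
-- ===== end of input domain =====

-- B changes: one-pass state machine with an in_list flag instead of A's nested index/while run detection (simpler decomposition, same cost).

-- ===== PORT A =====
-- a[i].startswith(('- ', '* ', ' * '))
def fmtAbullet (s : String) : Bool :=
  PySem.Str.startswith s "- " || PySem.Str.startswith s "* " || PySem.Str.startswith s " * "

-- '<li>%s' % a[i][2:].lstrip()
def fmtAli (s : String) : String :=
  "<li>" ++ PySem.Str.lstrip (PySem.Str.slice s (some 2) none)

-- the inner while: consumes the bullet run, returning (r, remaining lines)
def fmtAinner : List String → List String → List String × List String
  | r, [] => (r, [])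
  | r, a :: rest =>
    if fmtAbullet a then fmtAinner (r ++ [fmtAli a]) rest else (r, a :: rest)

theorem fmtAinner_len : ∀ (r xs : List String), (fmtAinner r xs).2.length ≤ xs.length := by
  intro r xs
  induction xs generalizing r with
  | nil => simp [fmtAinner]
  | cons a rest ih =>
    by_cases h : fmtAbullet a = true
    · simpa [fmtAinner, h] using Nat.le_succ_of_le (ih _)
    · simp [fmtAinner, h]

-- the outer while over the line index
def fmtAloop : List String → List String → List String
  | r, [] => r
  | r, a :: rest =>
    if fmtAbullet a then
      let p := fmtAinner (r ++ ["<p><ul>"]) (a :: rest)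
      fmtAloop (p.1 ++ ["</ul>"]) p.2
    else fmtAloop (r ++ [a]) rest
termination_by _ xs => xs.length
decreasing_by
  · simp only [fmtAinner, *, if_pos]
    exact Nat.lt_succ_of_le (fmtAinner_len _ _)
  · simp

def format_lists (h_ : String) : String :=
  PySem.Str.join "\n" (fmtAloop [] (PySem.Str.splitlines h_))

-- ===== PORT B =====
def fmtBbullet (line : String) : Bool :=
  PySem.Str.startswith line "- " || PySem.Str.startswith line "* " || PySem.Str.startswith line " * "

-- one step of the state machine: state is (r, in_list)
def fmtBstep (st : List String × Bool) (line : String) : List String × Bool :=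
  if fmtBbullet line then
    let r := if st.2 then st.1 else st.1 ++ ["<p><ul>"]
    (r ++ ["<li>" ++ PySem.Str.lstrip (PySem.Str.slice line (some 2) none)], true)
  else
    let r := if st.2 then st.1 ++ ["</ul>"] else st.1
    (r ++ [line], false)

def format_lists_alt (h_ : String) : String :=
  let st := (PySem.Str.splitlines h_).foldl fmtBstep ([], false)
  let r := if st.2 then st.1 ++ ["</ul>"] else st.1
  PySem.Str.join "\n" r

-- ===== PRECONDITION & SPEC =====
def Spec_format_lists (h_ : String) (out : String) : Prop := out = format_lists_alt h_
instance (h_ : String) (out : String) : Decidable (Spec_format_lists h_ out) := by unfold Spec_format_lists; infer_instance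

-- ===== CLAIM (what is proved, stated in full; the proofs are below) =====
def Claim_equal_format_lists : Prop := ∀ (h_ : String), Dom_format_lists h_ → Spec_format_lists h_ (format_lists h_)

-- ===== LEMMAS AND PROOFS =====
def fmtFin (st : List String × Bool) : List String :=
  if st.2 then st.1 ++ ["</ul>"] else st.1

theorem fmtB_eq_A_bullet (s : String) : fmtBbullet s = fmtAbullet s := rfl

theorem fmt_key : ∀ (n : Nat),
    (∀ (xs r : List String), xs.length = n →
      fmtAloop r xs = fmtFin (xs.foldl fmtBstep (r, false)))
    ∧ (∀ (xs r : List String), xs.length = n →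
      fmtAloop ((fmtAinner r xs).1 ++ ["</ul>"]) (fmtAinner r xs).2
        = fmtFin (xs.foldl fmtBstep (r, true))) := by
  intro n
  induction n using Nat.strong_induction_on with
  | _ n ih =>
    constructor
    · intro xs r hlen
      match xs, hlen with
      | [], _ => simp [fmtAloop, fmtFin]
      | a :: rest, hlen =>
        by_cases hb : fmtAbullet a = true
        · have h1 : fmtAinner (r ++ ["<p><ul>"]) (a :: rest)
              = fmtAinner (r ++ ["<p><ul>"] ++ [fmtAli a]) rest := by
            simp [fmtAinner, hb]
          rw [fmtAloop, if_pos hb]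
          simp only [h1]
          have := (ih rest.length (by rw [← hlen, List.length_cons]; omega)).2 rest (r ++ ["<p><ul>"] ++ [fmtAli a]) rfl
          rw [this]
          simp [fmtBstep, fmtB_eq_A_bullet, hb, fmtAli]
        · rw [fmtAloop, if_neg hb]
          have := (ih rest.length (by rw [← hlen, List.length_cons]; omega)).1 rest (r ++ [a]) rfl
          rw [this]
          simp [fmtBstep, fmtB_eq_A_bullet, hb]
    · intro xs r hlen
      match xs, hlen with
      | [], _ => simp [fmtAinner, fmtAloop, fmtFin]
      | a :: rest, hlen =>
        by_cases hb : fmtAbullet a = true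
        · have h1 : fmtAinner r (a :: rest) = fmtAinner (r ++ [fmtAli a]) rest := by
            simp [fmtAinner, hb]
          rw [h1]
          have := (ih rest.length (by rw [← hlen, List.length_cons]; omega)).2 rest (r ++ [fmtAli a]) rfl
          rw [this]
          simp [fmtBstep, fmtB_eq_A_bullet, hb, fmtAli]
        · have h1 : fmtAinner r (a :: rest) = (r, a :: rest) := by
            simp [fmtAinner, hb]
          rw [h1]
          rw [fmtAloop, if_neg hb]
          have := (ih rest.length (by rw [← hlen, List.length_cons]; omega)).1 rest (r ++ ["</ul>"] ++ [a]) rfl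
          rw [this]
          simp [fmtBstep, fmtB_eq_A_bullet, hb]

-- ===== VERDICT (by name: the statement is the Claim_ definition above) =====
theorem format_lists_spec : Claim_equal_format_lists := by
  intro h_ _
  unfold Spec_format_lists format_lists format_lists_alt
  rw [(fmt_key (PySem.Str.splitlines h_).length).1 _ [] rfl]
  rfl
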